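-- pv_equiv track=rewrite | github.com/danhetrick/quirc | lib/Quirc/Client/Channel.py | sortNicks
-- ===== SOURCE A (Python) =====
-- def sortNicks(users):
-- 	ops = []
-- 	voiced = []
-- 	normal = []
-- 	sortnicks = []
-- 	for nick in users:
-- 		if nick.isspace(): continue
-- 		if '@' in nick:
-- 			ops.append(nick)
-- 		elif '+' in nick:
-- 			voiced.append(nick)
-- 		else:
-- 			normal.append(nick)
-- 	ops = sorted(ops, key=str.lower)
-- 	voiced = sorted(voiced, key=str.lower)
-- 	normal = sorted(normal, key=str.lower)
-- 	for nick in ops: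
-- 		sortnicks.append(nick)
-- 	for nick in voiced:
-- 		sortnicks.append(nick)
-- 	for nick in normal:
-- 		sortnicks.append(nick)
-- 	return sortnicks
-- ===== SOURCE B (Python) =====
-- def sortNicks(users):
-- 	def prio(nick):
-- 		if '@' in nick:
-- 			return 0
-- 		if '+' in nick:
-- 			return 1
-- 		return 2
-- 	return sorted((nick for nick in users if not nick.isspace()),
-- 	              key=lambda nick: (prio(nick), nick.lower()))
-- ===== Notes on version B (the rewrite author's own statement) =====
-- stated objective: simpler
-- what changed: Replaces the three buckets, three separate sorts and three append loops by a single stable sort of the whitespace-filtered list under a composite (priority, lowercase) key.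
import Mathlib
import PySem

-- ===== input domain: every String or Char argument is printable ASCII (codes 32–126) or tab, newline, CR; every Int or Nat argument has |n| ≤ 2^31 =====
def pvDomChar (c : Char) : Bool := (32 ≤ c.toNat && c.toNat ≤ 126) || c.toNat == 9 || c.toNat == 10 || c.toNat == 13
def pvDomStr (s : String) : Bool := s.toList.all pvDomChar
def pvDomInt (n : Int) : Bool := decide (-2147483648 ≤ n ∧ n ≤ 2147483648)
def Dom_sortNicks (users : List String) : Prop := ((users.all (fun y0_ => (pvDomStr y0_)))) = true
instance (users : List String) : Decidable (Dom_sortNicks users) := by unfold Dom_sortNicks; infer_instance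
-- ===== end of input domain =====

-- B replaces A's three buckets / three separate sorts / three append loops by one stable
-- sort of the whitespace-filtered list under a composite (priority, lowercase) key (simpler).


-- ===== PORT A =====
def sortNicks (users : List String) : List String :=
  let acc := users.foldl
    (fun (acc : List String × List String × List String) nick =>
      if PySem.Str.strIsspace nick then acc
      else if PySem.Str.isIn "@" nick then (acc.1 ++ [nick], acc.2.1, acc.2.2)
      else if PySem.Str.isIn "+" nick then (acc.1, acc.2.1 ++ [nick], acc.2.2)
      else (acc.1, acc.2.1, acc.2.2 ++ [nick]))
    ([], [], [])
  let ops := PySem.List.sorted acc.1 (fun s => PySem.Str.lower s)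
  let voiced := PySem.List.sorted acc.2.1 (fun s => PySem.Str.lower s)
  let normal := PySem.List.sorted acc.2.2 (fun s => PySem.Str.lower s)
  let s1 := ops.foldl (fun sortnicks nick => sortnicks ++ [nick]) []
  let s2 := voiced.foldl (fun sortnicks nick => sortnicks ++ [nick]) s1
  normal.foldl (fun sortnicks nick => sortnicks ++ [nick]) s2

-- ===== PORT B =====
-- B's helper `prio`: op < voiced < normal
def pvPrio (nick : String) : Int :=
  if PySem.Str.isIn "@" nick then 0
  else if PySem.Str.isIn "+" nick then 1
  else 2

def sortNicks_alt (users : List String) : List String :=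
  PySem.List.sorted2 (users.filter (fun nick => !PySem.Str.strIsspace nick))
    pvPrio (fun nick => PySem.Str.lower nick)

-- ===== PRECONDITION & SPEC =====
def Spec_sortNicks (users : List String) (out : List String) : Prop := out = sortNicks_alt users
instance (users : List String) (out : List String) : Decidable (Spec_sortNicks users out) := by unfold Spec_sortNicks; infer_instance

-- ===== CLAIM (what is proved, stated in full; the proofs are below) =====
def Claim_equal_sortNicks : Prop := ∀ (users : List String), Dom_sortNicks users → Spec_sortNicks users (sortNicks users)

-- ===== LEMMAS AND PROOFS =====

theorem insertBy_nil {α : Type} (b : α → α → Bool) (x : α) :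
    PySem.List.insertBy b x [] = [x] := rfl

theorem insertBy_cons {α : Type} (b : α → α → Bool) (x y : α) (ys : List α) :
    PySem.List.insertBy b x (y :: ys) =
      if b x y then x :: y :: ys else y :: PySem.List.insertBy b x ys := rfl

theorem insertBy_congr {α : Type} (b b' : α → α → Bool) (x : α) (ys : List α)
    (h : ∀ y ∈ ys, b x y = b' x y) :
    PySem.List.insertBy b x ys = PySem.List.insertBy b' x ys := by
  induction ys with
  | nil => rfl
  | cons y ys ih =>
    rw [insertBy_cons, insertBy_cons, h y (by simp),
        ih (fun z hz => h z (by simp [hz]))]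

theorem insertBy_append_right {α : Type} (b : α → α → Bool) (x : α) (A t : List α)
    (h : ∀ y ∈ A, b x y = false) :
    PySem.List.insertBy b x (A ++ t) = A ++ PySem.List.insertBy b x t := by
  induction A with
  | nil => rfl
  | cons a A ih =>
    rw [List.cons_append, insertBy_cons, h a (by simp),
        ih (fun z hz => h z (by simp [hz]))]
    simp

theorem insertBy_append_left {α : Type} (b : α → α → Bool) (x : α) (A t : List α)
    (h : ∀ y ∈ t, b x y = true) :
    PySem.List.insertBy b x (A ++ t) = PySem.List.insertBy b x A ++ t := by
  induction A with
  | nil =>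
    cases t with
    | nil => rfl
    | cons y ys => simp [insertBy_cons, insertBy_nil, h y (by simp)]
  | cons a A ih =>
    rw [List.cons_append, insertBy_cons, insertBy_cons]
    by_cases hb : b x a
    · simp [hb]
    · simp [hb, ih]

theorem pvPrio_cases (x : String) : pvPrio x = 0 ∨ pvPrio x = 1 ∨ pvPrio x = 2 := by
  unfold pvPrio; split_ifs <;> simp

-- the comparison sorted2 uses (composite key), and the one sorted uses (lowercase key)
def pvLex (a b : String) : Bool :=
  decide (pvPrio a < pvPrio b) || (!decide (pvPrio b < pvPrio a) && decide (PySem.Str.lower a < PySem.Str.lower b))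

def pvKB (a b : String) : Bool := decide (PySem.Str.lower a < PySem.Str.lower b)

theorem sorted2_eq_foldl (xs : List String) :
    PySem.List.sorted2 xs pvPrio (fun n => PySem.Str.lower n) false =
      xs.foldl (fun acc x => PySem.List.insertBy pvLex x acc) [] := rfl

theorem sorted2_append_singleton (xs : List String) (x : String) :
    PySem.List.sorted2 (xs ++ [x]) pvPrio (fun n => PySem.Str.lower n) false =
      PySem.List.insertBy pvLex x
        (PySem.List.sorted2 xs pvPrio (fun n => PySem.Str.lower n) false) := by
  rw [sorted2_eq_foldl, sorted2_eq_foldl, List.foldl_append]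
  rfl

theorem sorted_append_singleton (l : List String) (x : String) :
    PySem.List.sorted (l ++ [x]) (fun s => PySem.Str.lower s) false =
      PySem.List.insertBy pvKB x (PySem.List.sorted l (fun s => PySem.Str.lower s) false) := by
  rw [PySem.List.sorted_eq_foldl_insertBy, PySem.List.sorted_eq_foldl_insertBy, List.foldl_append]
  rfl

theorem pvLex_false (x y : String) (h : pvPrio y < pvPrio x) : pvLex x y = false := by
  have h2 : ¬ (pvPrio x < pvPrio y) := by omega
  simp [pvLex, h, h2]

theorem pvLex_true (x y : String) (h : pvPrio x < pvPrio y) : pvLex x y = true := by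
  simp [pvLex, h]

theorem pvLex_eq_kb (x y : String) (h : pvPrio x = pvPrio y) : pvLex x y = pvKB x y := by
  simp [pvLex, pvKB, h]

theorem mem_sorted_filter_prio (i : Int) (y : String) (xs : List String)
    (h : y ∈ PySem.List.sorted (xs.filter (fun x => pvPrio x == i)) (fun s => PySem.Str.lower s) false) :
    pvPrio y = i := by
  rw [PySem.List.mem_sorted] at h
  simp [List.mem_filter] at h
  exact h.2

-- stability: one sort under the composite key = concatenation of the per-priority sorts
theorem sorted2_partition (xs : List String) :
    PySem.List.sorted2 xs pvPrio (fun n => PySem.Str.lower n) false =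
      PySem.List.sorted (xs.filter (fun x => pvPrio x == 0)) (fun s => PySem.Str.lower s) false ++
      PySem.List.sorted (xs.filter (fun x => pvPrio x == 1)) (fun s => PySem.Str.lower s) false ++
      PySem.List.sorted (xs.filter (fun x => pvPrio x == 2)) (fun s => PySem.Str.lower s) false := by
  induction xs using List.reverseRecOn with
  | nil => rfl
  | append_singleton xs x ih =>
    rw [sorted2_append_singleton, ih, List.filter_append, List.filter_append, List.filter_append]
    rcases pvPrio_cases x with h | h | h
    · have hx0 : (pvPrio x == 0) = true := by simp [h]
      have hx1 : (pvPrio x == 1) = false := by simp [h]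
      have hx2 : (pvPrio x == 2) = false := by simp [h]
      rw [List.append_assoc, insertBy_append_left pvLex x _ _
        (fun y hy => by
          rcases List.mem_append.1 hy with hy | hy
          · exact pvLex_true x y (by rw [h, mem_sorted_filter_prio 1 y xs hy]; norm_num)
          · exact pvLex_true x y (by rw [h, mem_sorted_filter_prio 2 y xs hy]; norm_num)),
        insertBy_congr pvLex pvKB x _
        (fun y hy => pvLex_eq_kb x y (by rw [h, mem_sorted_filter_prio 0 y xs hy]))]
      simp [List.filter, hx0, hx1, hx2, sorted_append_singleton]
    · have hx0 : (pvPrio x == 0) = false := by simp [h]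
      have hx1 : (pvPrio x == 1) = true := by simp [h]
      have hx2 : (pvPrio x == 2) = false := by simp [h]
      rw [insertBy_append_left pvLex x _ _
        (fun y hy => pvLex_true x y (by rw [h, mem_sorted_filter_prio 2 y xs hy]; norm_num)),
        insertBy_append_right pvLex x _ _
        (fun y hy => pvLex_false x y (by rw [h, mem_sorted_filter_prio 0 y xs hy]; norm_num)),
        insertBy_congr pvLex pvKB x _
        (fun y hy => pvLex_eq_kb x y (by rw [h, mem_sorted_filter_prio 1 y xs hy]))]
      simp [List.filter, hx0, hx1, hx2, sorted_append_singleton]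
    · have hx0 : (pvPrio x == 0) = false := by simp [h]
      have hx1 : (pvPrio x == 1) = false := by simp [h]
      have hx2 : (pvPrio x == 2) = true := by simp [h]
      rw [insertBy_append_right pvLex x _ _
        (fun y hy => by
          rcases List.mem_append.1 hy with hy | hy
          · exact pvLex_false x y (by rw [h, mem_sorted_filter_prio 0 y xs hy]; norm_num)
          · exact pvLex_false x y (by rw [h, mem_sorted_filter_prio 1 y xs hy]; norm_num)),
        insertBy_congr pvLex pvKB x _
        (fun y hy => pvLex_eq_kb x y (by rw [h, mem_sorted_filter_prio 2 y xs hy]))]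
      simp [List.filter, hx0, hx1, hx2, sorted_append_singleton]

-- A's bucket-building fold, characterised as three filters
theorem foldA (users : List String) (o v n : List String) :
    users.foldl
      (fun (acc : List String × List String × List String) nick =>
        if PySem.Str.strIsspace nick then acc
        else if PySem.Str.isIn "@" nick then (acc.1 ++ [nick], acc.2.1, acc.2.2)
        else if PySem.Str.isIn "+" nick then (acc.1, acc.2.1 ++ [nick], acc.2.2)
        else (acc.1, acc.2.1, acc.2.2 ++ [nick]))
      (o, v, n) =
    (o ++ users.filter (fun x => !PySem.Str.strIsspace x && pvPrio x == 0),
     v ++ users.filter (fun x => !PySem.Str.strIsspace x && pvPrio x == 1),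
     n ++ users.filter (fun x => !PySem.Str.strIsspace x && pvPrio x == 2)) := by
  induction users generalizing o v n with
  | nil => simp
  | cons u us ih =>
    simp only [List.foldl_cons, List.filter_cons]
    by_cases hs : PySem.Str.strIsspace u
    · simp only [hs, if_true, ih]
      simp
    · have hs' : (!PySem.Str.strIsspace u) = true := by
        cases hb : PySem.Str.strIsspace u; rfl; exact absurd hb hs
      by_cases hop : PySem.Str.isIn "@" u
      · have hp : pvPrio u = 0 := by unfold pvPrio; rw [if_pos hop]
        simp only [hs, hop, hp, ih]
        simp
      · by_cases hv : PySem.Str.isIn "+" u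
        · have hp : pvPrio u = 1 := by unfold pvPrio; rw [if_neg hop, if_pos hv]
          simp only [hs, hop, hv, hp, ih]
          simp
        · have hp : pvPrio u = 2 := by unfold pvPrio; rw [if_neg hop, if_neg hv]
          simp only [hs, hop, hv, hp, ih]
          simp

theorem filter_split (users : List String) (i : Int) :
    (users.filter (fun x => !PySem.Str.strIsspace x)).filter (fun x => pvPrio x == i) =
      users.filter (fun x => !PySem.Str.strIsspace x && pvPrio x == i) := by
  rw [List.filter_filter]
  exact List.filter_congr (fun x _ => by rw [Bool.and_comm])

theorem sortNicks_main (users : List String) : sortNicks users = sortNicks_alt users := by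
  unfold sortNicks sortNicks_alt
  rw [foldA, sorted2_partition, filter_split, filter_split, filter_split]
  rw [PySem.List.foldl_append_singleton, PySem.List.foldl_append_singleton,
    PySem.List.foldl_append_singleton]
  simp

-- ===== VERDICT (by name: the statement is the Claim_ definition above) =====
theorem sortNicks_spec : Claim_equal_sortNicks := by
  intro users _
  exact sortNicks_main users
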